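-- pv_equiv track=rewrite | github.com/maritinatsigka/computational-geometry-algorithms | computational_geometry/src/algorithms/delaunay_lifting.py | triangulation_edges
-- ===== SOURCE A (Python) =====
-- from typing import Iterable
--
-- Tri = tuple[int, int, int]
--
-- Edge = tuple[int, int]
--
-- def triangulation_edges(tris: Iterable[Tri]) -> list[Edge]:
--     edges: set[Edge] = set()
--     for a, b, c in tris:
--         e1 = (a, b) if a < b else (b, a)
--         e2 = (b, c) if b < c else (c, b)
--         e3 = (c, a) if c < a else (a, c)
--         edges.add(e1)
--         edges.add(e2)
--         edges.add(e3)
--     return sorted(edges)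
-- ===== SOURCE B (Python) =====
-- from typing import Iterable
--
-- Tri = tuple[int, int, int]
-- Edge = tuple[int, int]
--
-- def triangulation_edges(tris: Iterable[Tri]) -> list[Edge]:
--     all_edges: list[Edge] = []
--     for a, b, c in tris:
--         all_edges.append((a, b) if a < b else (b, a))
--         all_edges.append((b, c) if b < c else (c, b))
--         all_edges.append((c, a) if c < a else (a, c))
--     all_edges.sort()
--     result: list[Edge] = []
--     prev = None
--     for e in all_edges:
--         if e != prev:
--             result.append(e)
--             prev = e
--     return result
-- ===== Notes on version B (the rewrite author's own statement) =====
-- stated objective: alternative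
-- what changed: B replaces A's hash-set deduplication followed by a sort with a flat list of all 3n normalized edges, one sort, and a single adjacent-deduplication pass with a 'previous' variable (no set maintained).
import Mathlib
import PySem

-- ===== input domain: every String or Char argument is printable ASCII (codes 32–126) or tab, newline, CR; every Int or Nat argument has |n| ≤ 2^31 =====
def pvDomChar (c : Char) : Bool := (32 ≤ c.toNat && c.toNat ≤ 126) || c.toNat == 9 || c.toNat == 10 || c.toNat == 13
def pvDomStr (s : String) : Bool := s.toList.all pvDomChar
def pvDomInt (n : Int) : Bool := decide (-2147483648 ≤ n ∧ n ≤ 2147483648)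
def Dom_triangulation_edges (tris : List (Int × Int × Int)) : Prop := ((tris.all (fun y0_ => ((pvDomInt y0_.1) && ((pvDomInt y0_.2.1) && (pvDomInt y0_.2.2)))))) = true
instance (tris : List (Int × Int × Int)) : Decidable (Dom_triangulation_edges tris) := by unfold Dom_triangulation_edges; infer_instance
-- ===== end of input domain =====

-- B builds the flat list of all normalized edges, sorts it once, and removes duplicates by a
-- single adjacency pass with a 'previous' variable instead of maintaining a hash set (alternative,
-- same asymptotic cost). Return values proved equal on all inputs.

-- ===== PORT A =====
def triangulation_edges (tris : List (Int × Int × Int)) : List (Int × Int) :=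
  let edges : PySem.Set (Int × Int) :=
    tris.foldl (fun edges t =>
      let a := t.1; let b := t.2.1; let c := t.2.2
      let e1 := if a < b then (a, b) else (b, a)
      let e2 := if b < c then (b, c) else (c, b)
      let e3 := if c < a then (c, a) else (a, c)
      PySem.Set.add (PySem.Set.add (PySem.Set.add edges e1) e2) e3) PySem.Set.empty
  PySem.List.sorted2 edges Prod.fst (fun e => e.2) false

-- ===== PORT B =====
def triangulation_edges_alt (tris : List (Int × Int × Int)) : List (Int × Int) :=
  let all_edges : List (Int × Int) :=
    tris.foldl (fun all_edges t =>
      let a := t.1; let b := t.2.1; let c := t.2.2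
      ((all_edges ++ [if a < b then (a, b) else (b, a)])
        ++ [if b < c then (b, c) else (c, b)])
        ++ [if c < a then (c, a) else (a, c)]) []
  let all_edges := PySem.List.sorted2 all_edges Prod.fst (fun e => e.2) false
  let rp := all_edges.foldl
    (fun (rp : List (Int × Int) × Option (Int × Int)) e =>
      if rp.2 ≠ some e then (rp.1 ++ [e], some e) else rp) ([], none)
  rp.1

-- ===== PRECONDITION & SPEC =====
def Spec_triangulation_edges (tris : List (Int × Int × Int)) (out : List (Int × Int)) : Prop := out = triangulation_edges_alt tris
instance (tris : List (Int × Int × Int)) (out : List (Int × Int)) : Decidable (Spec_triangulation_edges tris out) := by unfold Spec_triangulation_edges; infer_instance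

-- ===== CLAIM (what is proved, stated in full; the proofs are below) =====
def Claim_equal_triangulation_edges : Prop := ∀ (tris : List (Int × Int × Int)), Dom_triangulation_edges tris → Spec_triangulation_edges tris (triangulation_edges tris)

-- ===== LEMMAS AND PROOFS =====

-- the three normalized edges of a triangle
def pvEdgesOf (t : Int × Int × Int) : List (Int × Int) :=
  [if t.1 < t.2.1 then (t.1, t.2.1) else (t.2.1, t.1),
   if t.2.1 < t.2.2 then (t.2.1, t.2.2) else (t.2.2, t.2.1),
   if t.2.2 < t.1 then (t.2.2, t.1) else (t.1, t.2.2)]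

-- recursive form of B's adjacent-dedup pass
def pvDa (prev : Option (Int × Int)) : List (Int × Int) → List (Int × Int)
  | [] => []
  | e :: t => if prev ≠ some e then e :: pvDa (some e) t else pvDa prev t

-- lexicographic key used by Python's tuple sort
def pvKey (e : Int × Int) : Lex (Int × Int) := toLex e

theorem pvKey_inj : Function.Injective pvKey := fun a b h => by
  simpa [pvKey] using congrArg (fun x => ofLex x) h

theorem pv_sorted2_eq_sorted (xs : List (Int × Int)) :
    PySem.List.sorted2 xs Prod.fst (fun e => e.2) false = PySem.List.sorted xs pvKey false := by
  have hbf : (fun (a b : Int × Int) => decide (a.1 < b.1) || (!decide (b.1 < a.1) && decide (a.2 < b.2)))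
      = (fun (a b : Int × Int) => decide (pvKey a < pvKey b)) := by
    funext a b
    by_cases h1 : a.1 < b.1 <;> by_cases h2 : b.1 < a.1 <;> by_cases h3 : a.2 < b.2 <;>
      simp [pvKey, Prod.Lex.lt_iff, h1, h2, h3] <;> omega
  simp only [PySem.List.sorted2, PySem.List.sorted, Bool.false_eq_true, if_false]
  rw [hbf]

theorem pv_listfold_eq (tris : List (Int × Int × Int)) (acc : List (Int × Int)) :
    tris.foldl (fun all_edges t =>
      let a := t.1; let b := t.2.1; let c := t.2.2
      ((all_edges ++ [if a < b then (a, b) else (b, a)])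
        ++ [if b < c then (b, c) else (c, b)])
        ++ [if c < a then (c, a) else (a, c)]) acc
    = acc ++ tris.flatMap pvEdgesOf := by
  induction tris generalizing acc with
  | nil => simp
  | cons t ts ih =>
    rw [List.foldl_cons, ih]
    simp [pvEdgesOf, List.flatMap_cons, List.append_assoc]

theorem pv_setfold_eq (tris : List (Int × Int × Int)) (s : PySem.Set (Int × Int)) :
    tris.foldl (fun edges t =>
      let a := t.1; let b := t.2.1; let c := t.2.2
      let e1 := if a < b then (a, b) else (b, a)
      let e2 := if b < c then (b, c) else (c, b)
      let e3 := if c < a then (c, a) else (a, c)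
      PySem.Set.add (PySem.Set.add (PySem.Set.add edges e1) e2) e3) s
    = (tris.flatMap pvEdgesOf).foldl PySem.Set.add s := by
  induction tris generalizing s with
  | nil => simp
  | cons t ts ih => simp [List.foldl_cons, ih, pvEdgesOf]

theorem pv_foldl_fst (xs : List (Int × Int)) (res : List (Int × Int)) (prev : Option (Int × Int)) :
    (xs.foldl (fun (rp : List (Int × Int) × Option (Int × Int)) e =>
        if rp.2 ≠ some e then (rp.1 ++ [e], some e) else rp) (res, prev)).1
    = res ++ pvDa prev xs := by
  induction xs generalizing res prev with
  | nil => simp [pvDa]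
  | cons e t ih =>
    by_cases h : prev ≠ some e
    · have hstep : (if (res, prev).2 ≠ some e then ((res, prev).1 ++ [e], some e) else (res, prev))
          = (res ++ [e], some e) := by simp [h]
      rw [List.foldl_cons, hstep, ih]
      simp [pvDa, h, List.append_assoc]
    · have hstep : (if (res, prev).2 ≠ some e then ((res, prev).1 ++ [e], some e) else (res, prev))
          = (res, prev) := by simp [not_not.mp h]
      rw [List.foldl_cons, hstep, ih]
      simp [pvDa, h]

-- behaviour of the dedup pass on a key-sorted list
theorem pvDa_spec (xs : List (Int × Int)) (prev : Option (Int × Int))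
    (hs : xs.Pairwise (fun a b => pvKey a ≤ pvKey b))
    (hp : ∀ p, prev = some p → ∀ y ∈ xs, pvKey p ≤ pvKey y) :
    (∀ x, x ∈ pvDa prev xs ↔ x ∈ xs ∧ prev ≠ some x) ∧
    (pvDa prev xs).Pairwise (fun a b => pvKey a < pvKey b) ∧
    (∀ p, prev = some p → ∀ y ∈ pvDa prev xs, pvKey p < pvKey y) := by
  induction xs generalizing prev with
  | nil => simp [pvDa]
  | cons e t ih =>
    have hs' := (List.pairwise_cons.mp hs).2
    have he := (List.pairwise_cons.mp hs).1
    have hpe : ∀ p, (some e : Option (Int × Int)) = some p → ∀ y ∈ t, pvKey p ≤ pvKey y := by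
      rintro p hpv y hy; cases hpv; exact he y hy
    obtain ⟨ihm, ihp, ihg⟩ := ih (some e) hs' hpe
    by_cases h : prev ≠ some e
    · have hred : pvDa prev (e :: t) = e :: pvDa (some e) t := by simp [pvDa, h]
      refine ⟨?_, ?_, ?_⟩
      · intro x
        rw [hred]
        simp only [List.mem_cons, ihm]
        constructor
        · rintro (rfl | ⟨hx, hne⟩)
          · exact ⟨Or.inl rfl, fun hh => h hh⟩
          · refine ⟨Or.inr hx, ?_⟩
            intro hpx
            have h1 : pvKey x ≤ pvKey e := hp x hpx e (List.mem_cons_self)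
            have h2 : pvKey e ≤ pvKey x := he x hx
            exact hne (congrArg some (pvKey_inj (le_antisymm h2 h1)))
        · rintro ⟨hx | hx, hne⟩
          · exact Or.inl hx
          · by_cases hxe : x = e
            · exact Or.inl hxe
            · exact Or.inr ⟨hx, fun hh => hxe (pvKey_inj (congrArg pvKey (Option.some.inj hh))).symm⟩
      · rw [hred]
        exact List.pairwise_cons.mpr ⟨fun y hy => ihg e rfl y hy, ihp⟩
      · rintro p rfl y hy
        rw [hred] at hy
        rcases List.mem_cons.mp hy with rfl | hy'
        · rcases lt_or_eq_of_le (hp p rfl y (List.mem_cons_self)) with hlt | heq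
          · exact hlt
          · exact absurd (congrArg some (pvKey_inj heq)) h
        · exact lt_of_le_of_lt (hp p rfl e (List.mem_cons_self)) (ihg e rfl y hy')
    · push_neg at h
      subst h
      have hred : pvDa (some e) (e :: t) = pvDa (some e) t := by simp [pvDa]
      refine ⟨?_, ?_, ?_⟩
      · intro x
        rw [hred]
        simp only [List.mem_cons, ihm]
        constructor
        · rintro ⟨hx, hne⟩; exact ⟨Or.inr hx, hne⟩
        · rintro ⟨hx | hx, hne⟩
          · exact absurd (congrArg some hx.symm) hne
          · exact ⟨hx, hne⟩
      · rw [hred]; exact ihp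
      · rintro p hpv y hy
        cases hpv
        rw [hred] at hy
        exact ihg _ rfl y hy

-- ===== VERDICT (by name: the statement is the Claim_ definition above) =====
theorem triangulation_edges_spec : Claim_equal_triangulation_edges := by
  intro tris _
  unfold Spec_triangulation_edges triangulation_edges triangulation_edges_alt
  simp only []
  rw [pv_listfold_eq, pv_setfold_eq, List.nil_append]
  set allE := tris.flatMap pvEdgesOf with hallE
  rw [pv_sorted2_eq_sorted, pv_sorted2_eq_sorted]
  rw [pv_foldl_fst, List.nil_append]
  have hsorted : (PySem.List.sorted allE pvKey false).Pairwise (fun a b => pvKey a ≤ pvKey b) :=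
    PySem.List.sorted_pairwise allE pvKey
  obtain ⟨hmem, hpw, -⟩ := pvDa_spec (PySem.List.sorted allE pvKey false) none hsorted (by simp)
  have hnodup : (pvDa none (PySem.List.sorted allE pvKey false)).Nodup :=
    hpw.imp (fun h => fun e => absurd (congrArg pvKey e) (ne_of_lt h))
  have hofl : (allE.foldl PySem.Set.add PySem.Set.empty) = PySem.Set.ofList allE :=
    (PySem.Set.ofList_eq_foldl allE).symm
  rw [hofl]
  refine PySem.List.sorted_eq_of_perm_of_pairwise_lt _ _ pvKey ?_ hpw
  refine (List.perm_ext_iff_of_nodup hnodup (PySem.Set.nodup_ofList allE)).mpr ?_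
  intro x
  rw [hmem x, PySem.Set.mem_ofList, PySem.List.mem_sorted]
  simp
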